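-- pv_equiv track=rewrite | github.com/cosminbvb/Uni | Artificial Intelligence/Knowledge Representation/2/pb_blocuri_a_star.py | diferenta_stari_2
-- ===== SOURCE A (Python) =====
-- def diferenta_stari_2(stare1, stare2):
--     nr_stive = len(stare1)
--     dif = 0  # diferenta totala dintre cele 2 stari
--     for i in range(nr_stive):
--         s, t = stare1[i], stare2[i]  # stiva i din ambele stari
--         dif_stiva = 0  # diferenta a doua stive
--         # calculam costul total al blocurilor care nu sunt in aceleasi pozitii
--         for j in range(min(len(s), len(t))):
--             if s[j] != t[j]:
--                 dif_stiva += (1 + ord(s[j]) - ord('a'))  # adunam costul de a muta blocul s[j]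
--         # daca stiva s > stiva t, parcurgem "surplusul" din s
--         for j in range(len(t), len(s)):
--             dif_stiva += (1 + ord(s[j]) - ord('a'))
--         dif += dif_stiva
--     return dif
-- ===== SOURCE B (Python) =====
-- def diferenta_stari_2(stare1, stare2):
--     dif = 0
--     for s, t in zip(stare1, stare2):
--         # cost of every block in s, as if nothing matched
--         total = sum(1 + ord(c) - ord('a') for c in s)
--         # cost of the blocks already in place; taller t beyond len(s) contributes nothing
--         matched = sum(1 + ord(cs) - ord('a') for cs, ct in zip(s, t) if cs == ct)
--         dif += total - matched
--     return dif
-- ===== Notes on version B (the rewrite author's own statement) =====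
-- stated objective: alternative
-- what changed: Replaces A's per-stack 'mismatch loop over the common prefix + surplus loop over the taller stare1 tail' with a complementary decomposition: sum the weight of every block of stare1[i], then subtract the weight of the blocks already matched in zip(s,t), iterating stacks by zip instead of indices.
-- outside the precondition, e.g. on diferenta_stari_2([['ab']], [['ab']]): A returns 0, B raises TypeError; on diferenta_stari_2([['a']], []): A raises IndexError, B returns 0
import Mathlib
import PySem

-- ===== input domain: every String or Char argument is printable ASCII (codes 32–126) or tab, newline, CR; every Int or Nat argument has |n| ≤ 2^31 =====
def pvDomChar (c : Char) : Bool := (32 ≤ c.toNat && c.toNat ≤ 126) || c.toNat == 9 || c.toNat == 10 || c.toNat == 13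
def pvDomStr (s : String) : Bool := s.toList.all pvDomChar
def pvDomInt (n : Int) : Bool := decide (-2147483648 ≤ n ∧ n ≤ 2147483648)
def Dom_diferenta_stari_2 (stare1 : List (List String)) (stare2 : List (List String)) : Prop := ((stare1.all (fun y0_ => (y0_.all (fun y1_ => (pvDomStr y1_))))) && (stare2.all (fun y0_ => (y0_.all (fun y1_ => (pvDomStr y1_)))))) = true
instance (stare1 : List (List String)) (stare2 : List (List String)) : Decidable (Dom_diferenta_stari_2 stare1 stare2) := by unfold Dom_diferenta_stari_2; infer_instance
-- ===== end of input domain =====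

-- B replaces A's per-stack "mismatch loop + surplus loop" with a complementary
-- "total weight of stare1's blocks minus weight of matched blocks" decomposition
-- over zip(stare1, stare2); same cost, different algorithmic decomposition.


-- ord(b) for a single-character string b (Pre_ guarantees length 1; exact there)
def pvOrd (b : String) : Int := ((b.toList.headD 'a').toNat : Int)

-- ===== PORT A =====
def diferenta_stari_2 (stare1 : List (List String)) (stare2 : List (List String)) : Int :=
  let nr_stive := stare1.length
  (List.range nr_stive).foldl (fun dif i =>
    let s := stare1.getD i []
    let t := stare2.getD i []
    -- for j in range(min(len(s), len(t))): mismatched blocks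
    let dif_stiva : Int :=
      (List.range (min s.length t.length)).foldl (fun d j =>
        if s.getD j "" ≠ t.getD j "" then d + (1 + pvOrd (s.getD j "") - 97) else d) 0
    -- for j in range(len(t), len(s)): the surplus of s
    let dif_stiva2 : Int :=
      (List.range' t.length (s.length - t.length)).foldl (fun d j =>
        d + (1 + pvOrd (s.getD j "") - 97)) dif_stiva
    dif + dif_stiva2) 0

-- ===== PORT B =====
def diferenta_stari_2_alt (stare1 : List (List String)) (stare2 : List (List String)) : Int :=
  (stare1.zip stare2).foldl (fun dif st =>
    let total := (st.1.map (fun c => 1 + pvOrd c - 97)).sum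
    let matched := (((st.1.zip st.2).filter (fun p => p.1 == p.2)).map (fun p => 1 + pvOrd p.1 - 97)).sum
    dif + (total - matched)) 0

-- ===== PRECONDITION & SPEC =====
-- Pre_ excludes (a) stare1 longer than stare2, where A raises IndexError, and
-- (b) multi-character blocks in stare1, where A raises TypeError on ord() unless the
-- block happens to sit matched in both states (then A returns but B's total pass raises).
def Pre_diferenta_stari_2 (stare1 : List (List String)) (stare2 : List (List String)) : Prop :=
  stare1.length ≤ stare2.length ∧ ∀ s ∈ stare1, ∀ b ∈ s, b.length = 1
instance (stare1 : List (List String)) (stare2 : List (List String)) : Decidable (Pre_diferenta_stari_2 stare1 stare2) := by unfold Pre_diferenta_stari_2; infer_instance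
def pvWitness_diferenta_stari_2 : List (List String) × List (List String) :=
  ([["a"], ["b", "c"]], [["a"], ["c"]])

def Spec_diferenta_stari_2 (stare1 : List (List String)) (stare2 : List (List String)) (out : Int) : Prop := out = diferenta_stari_2_alt stare1 stare2
instance (stare1 : List (List String)) (stare2 : List (List String)) (out : Int) : Decidable (Spec_diferenta_stari_2 stare1 stare2 out) := by unfold Spec_diferenta_stari_2; infer_instance

-- ===== CLAIM (what is proved, stated in full; the proofs are below) =====
def Claim_equal_diferenta_stari_2 : Prop := ∀ (stare1 : List (List String)) (stare2 : List (List String)), Dom_diferenta_stari_2 stare1 stare2 → Pre_diferenta_stari_2 stare1 stare2 → Spec_diferenta_stari_2 stare1 stare2 (diferenta_stari_2 stare1 stare2)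

-- ===== LEMMAS AND PROOFS =====

-- surplus loop over range'(k, |s|-k) is the weight sum of s.drop k
theorem pv_surplus (n : Nat) : ∀ (s : List String) (k : Nat) (init : Int), s.length - k = n →
    (List.range' k n).foldl (fun d j => d + (1 + pvOrd (s.getD j "") - 97)) init
      = init + ((s.drop k).map (fun b => 1 + pvOrd b - 97)).sum := by
  induction n with
  | zero =>
    intro s k init h
    have hk : s.length ≤ k := by omega
    simp [List.drop_eq_nil_of_le hk]
  | succ n ih =>
    intro s k init h
    have hk : k < s.length := by omega
    have hg : s.getD k "" = s[k] := by
      simp [List.getD_eq_getElem?_getD, List.getElem?_eq_getElem hk]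
    rw [List.range'_succ]
    simp only [List.foldl_cons]
    rw [hg, ih s (k + 1) _ (by omega), List.drop_eq_getElem_cons hk,
        List.map_cons, List.sum_cons]
    ring

-- mismatch loop over range'(k, min-k) is the weight sum of the mismatched pairs of the dropped zips
theorem pv_mismatch (n : Nat) : ∀ (s t : List String) (k : Nat) (init : Int),
    min s.length t.length - k = n →
    (List.range' k n).foldl (fun d j =>
        if s.getD j "" ≠ t.getD j "" then d + (1 + pvOrd (s.getD j "") - 97) else d) init
      = init + ((((s.drop k).zip (t.drop k)).filter (fun p => ¬ (p.1 == p.2))).map (fun p => 1 + pvOrd p.1 - 97)).sum := by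
  induction n with
  | zero =>
    intro s t k init h
    have : s.length ≤ k ∨ t.length ≤ k := by omega
    rcases this with hk | hk
    · simp [List.drop_eq_nil_of_le hk]
    · simp [List.drop_eq_nil_of_le hk]
  | succ n ih =>
    intro s t k init h
    have hks : k < s.length := by omega
    have hkt : k < t.length := by omega
    have hs : s.getD k "" = s[k] := by
      simp [List.getD_eq_getElem?_getD, List.getElem?_eq_getElem hks]
    have ht : t.getD k "" = t[k] := by
      simp [List.getD_eq_getElem?_getD, List.getElem?_eq_getElem hkt]
    rw [List.range'_succ]
    simp only [List.foldl_cons]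
    rw [hs, ht, ih s t (k + 1) _ (by omega), List.drop_eq_getElem_cons hks,
        List.drop_eq_getElem_cons hkt, List.zip_cons_cons, List.filter_cons]
    by_cases hstk : s[k] = t[k]
    · simp [hstk]
    · simp [hstk]
      ring

-- first components of a zip are the take
theorem pv_map_fst_zip {α : Type} (s : List α) : ∀ (t : List String),
    ((s.zip t).map Prod.fst) = s.take t.length := by
  induction s with
  | nil => intro t; simp
  | cons a s ih =>
    intro t
    cases t with
    | nil => simp
    | cons b t => simp [ih t]

-- a weighted sum over a zip splits into matched + mismatched
theorem pv_split (z : List (String × String)) :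
    ((z.map (fun p => 1 + pvOrd p.1 - 97)).sum)
      = ((z.filter (fun p => p.1 == p.2)).map (fun p => 1 + pvOrd p.1 - 97)).sum
        + ((z.filter (fun p => ¬ (p.1 == p.2))).map (fun p => 1 + pvOrd p.1 - 97)).sum := by
  induction z with
  | nil => simp
  | cons p z ih =>
    by_cases h : p.1 = p.2
    · simp [h, ih]; ring
    · simp [h, ih]; ring

-- per-stack: A's two loops compute B's total - matched
theorem pv_stack (s t : List String) :
    (List.range' t.length (s.length - t.length)).foldl
        (fun d j => d + (1 + pvOrd (s.getD j "") - 97))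
        ((List.range (min s.length t.length)).foldl (fun d j =>
          if s.getD j "" ≠ t.getD j "" then d + (1 + pvOrd (s.getD j "") - 97) else d) 0)
      = (s.map (fun c => 1 + pvOrd c - 97)).sum
        - (((s.zip t).filter (fun p => p.1 == p.2)).map (fun p => 1 + pvOrd p.1 - 97)).sum := by
  rw [List.range_eq_range']
  rw [pv_mismatch (min s.length t.length) s t 0 0 (by omega)]
  rw [pv_surplus (s.length - t.length) s t.length _ rfl]
  simp only [List.drop_zero]
  have hzipfst : ((s.zip t).map (fun p => 1 + pvOrd p.1 - 97))
      = (s.take t.length).map (fun b => 1 + pvOrd b - 97) := by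
    rw [← pv_map_fst_zip s t, List.map_map]
    rfl
  have htot : (s.map (fun c => 1 + pvOrd c - 97)).sum
      = ((s.zip t).map (fun p => 1 + pvOrd p.1 - 97)).sum
        + ((s.drop t.length).map (fun b => 1 + pvOrd b - 97)).sum := by
    rw [hzipfst]
    conv_lhs => rw [← List.take_append_drop t.length s]
    rw [List.map_append, List.sum_append]
  rw [htot, pv_split (s.zip t)]
  ring

-- outer loop: A's index loop over range(len(stare1)) equals B's zip fold, given |stare1| ≤ |stare2|
theorem pv_outer (n : Nat) : ∀ (s1 s2 : List (List String)) (k : Nat) (init : Int),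
    s1.length - k = n → s1.length ≤ s2.length →
    (List.range' k n).foldl (fun dif i =>
        dif + (List.range' (s2.getD i []).length ((s1.getD i []).length - (s2.getD i []).length)).foldl
          (fun d j => d + (1 + pvOrd ((s1.getD i []).getD j "") - 97))
          ((List.range (min (s1.getD i []).length (s2.getD i []).length)).foldl (fun d j =>
            if (s1.getD i []).getD j "" ≠ (s2.getD i []).getD j ""
            then d + (1 + pvOrd ((s1.getD i []).getD j "") - 97) else d) 0)) init
      = ((s1.drop k).zip (s2.drop k)).foldl (fun dif st =>
          dif + (((st.1.map (fun c => 1 + pvOrd c - 97)).sum)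
            - (((st.1.zip st.2).filter (fun p => p.1 == p.2)).map (fun p => 1 + pvOrd p.1 - 97)).sum)) init := by
  induction n with
  | zero =>
    intro s1 s2 k init h hle
    have hk : s1.length ≤ k := by omega
    simp [List.drop_eq_nil_of_le hk]
  | succ n ih =>
    intro s1 s2 k init h hle
    have hk1 : k < s1.length := by omega
    have hk2 : k < s2.length := by omega
    have hg1 : s1.getD k [] = s1[k] := by
      simp [List.getD_eq_getElem?_getD, List.getElem?_eq_getElem hk1]
    have hg2 : s2.getD k [] = s2[k] := by
      simp [List.getD_eq_getElem?_getD, List.getElem?_eq_getElem hk2]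
    rw [List.range'_succ]
    simp only [List.foldl_cons]
    rw [hg1, hg2, ih s1 s2 (k + 1) _ (by omega) hle, List.drop_eq_getElem_cons hk1,
        List.drop_eq_getElem_cons hk2, List.zip_cons_cons, List.foldl_cons]
    rw [pv_stack]

-- ===== VERDICT (by name: the statement is the Claim_ definition above) =====
theorem diferenta_stari_2_spec : Claim_equal_diferenta_stari_2 := by
  intro s1 s2 _ hpre
  unfold Spec_diferenta_stari_2
  simp only [diferenta_stari_2, diferenta_stari_2_alt]
  rw [List.range_eq_range']
  rw [pv_outer s1.length s1 s2 0 0 rfl hpre.1]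
  simp only [List.drop_zero]
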